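-- pv_equiv track=rewrite | github.com/Pranavi2002/CodePath-TP-102-Course | Unit-3/session-2/s2v2p6.py | count_balanced_terrain_subsections
-- ===== SOURCE A (Python) =====
-- def count_balanced_terrain_subsections(terrain):
--     groups = []
--     count = 1
--
--     # Step 1: Count lengths of consecutive same characters
--     for i in range(1, len(terrain)):
--         if terrain[i] == terrain[i - 1]:
--             count += 1
--         else:
--             groups.append(count)
--             count = 1
--     groups.append(count)  # for the last group
--
--     # Step 2: Count balanced pairs between adjacent groups
--     balanced_count = 0
--     for i in range(1, len(groups)):
--         balanced_count += min(groups[i - 1], groups[i])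
--
--     return balanced_count
-- ===== SOURCE B (Python) =====
-- def count_balanced_terrain_subsections(terrain):
--     # Expand-around-boundary: each run boundary contributes one balanced
--     # substring per radius k while both sides stay uniform; count radii
--     # directly by two-sided expansion, never computing run lengths.
--     n = len(terrain)
--     total = 0
--     for p in range(1, n):
--         if terrain[p] != terrain[p - 1]:
--             k = 1
--             while (k <= p - 1 and p + k <= n - 1
--                    and terrain[p - k - 1] == terrain[p - 1]
--                    and terrain[p + k] == terrain[p]):
--                 k += 1
--             total += k
--     return total
-- ===== Notes on version B (the rewrite author's own statement) =====
-- stated objective: alternative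
-- what changed: Replaced A's run-length algorithm (build the list of consecutive-run lengths, then a second pass summing min of adjacent entries) by an expand-around-boundary algorithm: scan for positions where the character changes and, at each such boundary, grow a radius k outwards while both sides stay uniform, adding the final radius; no run lengths are ever computed or stored.
import Mathlib
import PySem

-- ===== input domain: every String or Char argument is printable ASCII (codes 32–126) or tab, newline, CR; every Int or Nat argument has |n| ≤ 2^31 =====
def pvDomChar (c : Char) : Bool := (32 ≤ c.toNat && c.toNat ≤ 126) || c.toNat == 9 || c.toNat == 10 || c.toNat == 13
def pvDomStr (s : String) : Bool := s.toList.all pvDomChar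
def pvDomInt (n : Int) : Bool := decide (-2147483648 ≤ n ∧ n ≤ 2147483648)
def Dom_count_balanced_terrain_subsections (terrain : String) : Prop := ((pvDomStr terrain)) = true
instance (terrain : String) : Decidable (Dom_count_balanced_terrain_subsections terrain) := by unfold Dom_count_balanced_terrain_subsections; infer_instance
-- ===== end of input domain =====

-- B replaces A's run-length bookkeeping (build the list of run lengths, then sum
-- adjacent minima) by a different algorithm: it scans for run boundaries and, at
-- each boundary, expands outwards counting the radii at which both sides stay
-- uniform; objective: alternative (a genuinely different algorithm, not claimed faster).

-- ===== PORT A =====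
-- loop body of A's first pass: state = (groups, count)
def pvStepA (cs : List Char) (st : List Int × Int) (i : Int) : List Int × Int :=
  if PySem.List.pyGetD cs i ' ' = PySem.List.pyGetD cs (i - 1) ' ' then
    (st.1, st.2 + 1)
  else
    (st.1 ++ [st.2], 1)

-- A's second pass: balanced_count over range(1, len(groups))
def pvSecondPass (groups : List Int) : Int :=
  (PySem.List.pyRange 1 (groups.length : Int) 1).foldl
    (fun acc i => acc + min (PySem.List.pyGetD groups (i - 1) 0) (PySem.List.pyGetD groups i 0)) 0

def count_balanced_terrain_subsections (terrain : String) : Int :=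
  let cs := terrain.toList
  let st := (PySem.List.pyRange 1 (PySem.Str.len terrain) 1).foldl (pvStepA cs) ([], 1)
  pvSecondPass (st.1 ++ [st.2])

-- ===== PORT B =====
-- B's while loop: grow the radius k around boundary p while both sides stay uniform
def pvExpand (cs : List Char) (p k : Int) : Int :=
  if h : k ≤ p - 1 ∧ p + k ≤ (cs.length : Int) - 1
      ∧ PySem.List.pyGetD cs (p - k - 1) ' ' = PySem.List.pyGetD cs (p - 1) ' '
      ∧ PySem.List.pyGetD cs (p + k) ' ' = PySem.List.pyGetD cs p ' '
  then pvExpand cs p (k + 1) else k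
termination_by (p - k).toNat
decreasing_by
  have := h.1; omega

-- B's loop body: at a boundary add the expansion count
def pvStepB (cs : List Char) (tot : Int) (p : Int) : Int :=
  if PySem.List.pyGetD cs p ' ' ≠ PySem.List.pyGetD cs (p - 1) ' ' then
    tot + pvExpand cs p 1
  else tot

def count_balanced_terrain_subsections_alt (terrain : String) : Int :=
  let cs := terrain.toList
  (PySem.List.pyRange 1 (PySem.Str.len terrain) 1).foldl (pvStepB cs) 0

-- ===== PRECONDITION & SPEC =====
def Spec_count_balanced_terrain_subsections (terrain : String) (out : Int) : Prop := out = count_balanced_terrain_subsections_alt terrain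
instance (terrain : String) (out : Int) : Decidable (Spec_count_balanced_terrain_subsections terrain out) := by unfold Spec_count_balanced_terrain_subsections; infer_instance

-- ===== CLAIM (what is proved, stated in full; the proofs are below) =====
def Claim_equal_count_balanced_terrain_subsections : Prop := ∀ (terrain : String), Dom_count_balanced_terrain_subsections terrain → Spec_count_balanced_terrain_subsections terrain (count_balanced_terrain_subsections terrain)

-- ===== LEMMAS AND PROOFS =====

-- sum of minima of adjacent elements, structurally
def pvPairSum : List Int → Int
  | [] => 0
  | [_] => 0
  | a :: b :: t => min a b + pvPairSum (b :: t)

-- A's groups list (including the trailing append), as a function of the char list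
def pvAG (cs : List Char) : List Int :=
  ((PySem.List.pyRange 1 (cs.length : Int) 1).foldl (pvStepA cs) ([], 1)).1
    ++ [((PySem.List.pyRange 1 (cs.length : Int) 1).foldl (pvStepA cs) ([], 1)).2]

-- B's per-index contribution
def pvG (cs : List Char) (p : Int) : Int :=
  if PySem.List.pyGetD cs p ' ' ≠ PySem.List.pyGetD cs (p - 1) ' ' then pvExpand cs p 1 else 0

-- B's total, as a sum
def pvBval (cs : List Char) : Int :=
  ((PySem.List.pyRange 1 (cs.length : Int) 1).map (pvG cs)).sum

theorem pvPairSum_concat (gs : List Int) (x : Int) (h : gs ≠ []) :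
    pvPairSum (gs ++ [x]) = pvPairSum gs + min (gs.getLastD 0) x := by
  induction gs with
  | nil => exact absurd rfl h
  | cons a rest ih =>
    cases rest with
    | nil => simp [pvPairSum]
    | cons b t =>
      have := ih (by simp)
      simp only [List.cons_append, pvPairSum] at *
      rw [this]
      simp
      ring

-- A's second pass computes pvPairSum
theorem pvSecondPass_eq (gs : List Int) : pvSecondPass gs = pvPairSum gs := by
  induction gs using List.reverseRecOn with
  | nil => simp [pvSecondPass, pvPairSum, PySem.List.pyRange_one_eq_nil]
  | append_singleton gs x ih =>
    by_cases hgs : gs = []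
    · subst hgs
      simp [pvSecondPass, pvPairSum, PySem.List.pyRange_one_eq_nil]
    · have hlen : 1 ≤ (gs.length : Int) := by
        have : gs.length ≠ 0 := by simpa [List.length_eq_zero_iff] using hgs
        omega
      have hsplit : PySem.List.pyRange 1 ((gs ++ [x]).length : Int) 1
          = PySem.List.pyRange 1 (gs.length : Int) 1 ++ [(gs.length : Int)] := by
        have : ((gs ++ [x]).length : Int) = (gs.length : Int) + 1 := by simp
        rw [this, PySem.List.pyRange_one_succ_right hlen]
      have hL : ((gs ++ [x]).length : Int) = (gs.length : Int) + 1 := by simp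
      unfold pvSecondPass
      rw [hsplit, List.foldl_append]
      have hcongr :
          (PySem.List.pyRange 1 (gs.length : Int) 1).foldl
            (fun acc i => acc + min (PySem.List.pyGetD (gs ++ [x]) (i - 1) 0) (PySem.List.pyGetD (gs ++ [x]) i 0)) 0
          = (PySem.List.pyRange 1 (gs.length : Int) 1).foldl
            (fun acc i => acc + min (PySem.List.pyGetD gs (i - 1) 0) (PySem.List.pyGetD gs i 0)) 0 := by
        apply PySem.List.foldl_congr_mem
        intro acc i hi
        have hi' := (PySem.List.mem_pyRange_one).1 hi
        have h1 : PySem.List.pyGetD (gs ++ [x]) i 0 = PySem.List.pyGetD gs i 0 := by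
          rw [PySem.List.pyGetD_eq_getElem _ _ (by omega) (by omega),
              PySem.List.pyGetD_eq_getElem _ _ (by omega) (by omega)]
          exact List.getElem_append_left (by omega)
        have h2 : PySem.List.pyGetD (gs ++ [x]) (i - 1) 0 = PySem.List.pyGetD gs (i - 1) 0 := by
          rw [PySem.List.pyGetD_eq_getElem _ _ (by omega) (by omega),
              PySem.List.pyGetD_eq_getElem _ _ (by omega) (by omega)]
          exact List.getElem_append_left (by omega)
        rw [h1, h2]
      rw [hcongr]
      have hx : PySem.List.pyGetD (gs ++ [x]) ((gs.length : Int)) 0 = x := by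
        rw [PySem.List.pyGetD_eq_getElem _ _ (by omega) (by omega)]
        simp
      have hlast : PySem.List.pyGetD (gs ++ [x]) ((gs.length : Int) - 1) 0 = gs.getLastD 0 := by
        rw [PySem.List.pyGetD_eq_getElem _ _ (by omega) (by omega),
            List.getElem_append_left (by omega)]
        have he : ((gs.length : Int) - 1).toNat = gs.length - 1 := by omega
        simp only [he]
        rw [List.getLastD_eq_getLast?, List.getLast?_eq_getElem?,
            List.getElem?_eq_getElem (by omega)]
        simp
      simp only [List.foldl_cons, List.foldl_nil]
      rw [hx, hlast, pvPairSum_concat gs x hgs]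
      unfold pvSecondPass at ih
      rw [ih]

-- indexing into a replicate-prefix
theorem pvGet_rep (i : Nat) (a : Char) (rest : List Char) (q : Int)
    (h0 : 0 ≤ q) (h1 : q < (i : Int)) :
    PySem.List.pyGetD (List.replicate i a ++ rest) q ' ' = a := by
  rw [PySem.List.pyGetD_eq_getElem _ _ h0 (by simp; omega)]
  rw [List.getElem_append_left (by simp; omega)]
  simp

-- indexing past a prefix
theorem pvGet_app (pre rest : List Char) (q : Int)
    (h0 : 0 ≤ q) (h1 : q < (rest.length : Int)) :
    PySem.List.pyGetD (pre ++ rest) ((pre.length : Int) + q) ' ' = PySem.List.pyGetD rest q ' ' := by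
  rw [PySem.List.pyGetD_eq_getElem _ _ (by omega) (by simp; omega),
      PySem.List.pyGetD_eq_getElem _ _ h0 h1]
  have ht : (((pre.length : Int)) + q).toNat = pre.length + q.toNat := by omega
  rw [List.getElem_append_right (by omega)]
  congr 1
  omega

-- splitting a range
theorem pvRange_split (a b c : Int) (hab : a ≤ b) (hbc : b ≤ c) :
    PySem.List.pyRange a c = PySem.List.pyRange a b ++ PySem.List.pyRange b c := by
  by_cases h : a = b
  · subst h; rw [PySem.List.pyRange_one_eq_nil le_rfl]; simp
  · have hlt : a < b := lt_of_le_of_ne hab h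
    rw [PySem.List.pyRange_one_cons (lt_of_lt_of_le hlt hbc), PySem.List.pyRange_one_cons hlt,
        pvRange_split (a + 1) b c (by omega) hbc]
    simp
termination_by (b - a).toNat
decreasing_by omega

-- shifting a range
theorem pvRange_shift (a b k : Int) :
    PySem.List.pyRange (a + k) (b + k) = (PySem.List.pyRange a b).map (· + k) := by
  by_cases h : a < b
  · rw [PySem.List.pyRange_one_cons (by omega), PySem.List.pyRange_one_cons h]
    simp only [List.map_cons]
    have e : a + k + 1 = a + 1 + k := by ring
    rw [e, pvRange_shift (a + 1) b k]
  · rw [PySem.List.pyRange_one_eq_nil (by omega), PySem.List.pyRange_one_eq_nil (by omega)]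
    simp
termination_by (b - a).toNat
decreasing_by omega

-- A's first pass only appends to groups: the prefix factors out
theorem pvFoldA_factor (cs : List Char) (l : List Int) (G : List Int) (c : Int) :
    l.foldl (pvStepA cs) (G, c)
      = (G ++ (l.foldl (pvStepA cs) ([], c)).1, (l.foldl (pvStepA cs) ([], c)).2) := by
  induction l generalizing G c with
  | nil => simp
  | cons x l ih =>
    simp only [List.foldl_cons]
    by_cases h : PySem.List.pyGetD cs x ' ' = PySem.List.pyGetD cs (x - 1) ' '
    · have e1 : pvStepA cs (G, c) x = (G, c + 1) := by unfold pvStepA; rw [if_pos h]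
      have e2 : pvStepA cs ([], c) x = ([], c + 1) := by unfold pvStepA; rw [if_pos h]
      rw [e1, e2]
      exact ih G (c + 1)
    · have e1 : pvStepA cs (G, c) x = (G ++ [c], 1) := by unfold pvStepA; rw [if_neg h]
      have e2 : pvStepA cs ([], c) x = ([c], 1) := by unfold pvStepA; rw [if_neg h]; simp
      rw [e1, e2, ih (G ++ [c]) 1, ih [c] 1]
      simp

-- A's first pass over indices with no boundary just counts
theorem pvFoldA_const (cs : List Char) (a b : Int) (st : List Int × Int) (hab : a ≤ b)
    (h : ∀ q, a ≤ q → q < b → PySem.List.pyGetD cs q ' ' = PySem.List.pyGetD cs (q - 1) ' ') :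
    (PySem.List.pyRange a b).foldl (pvStepA cs) st = (st.1, st.2 + (b - a)) := by
  by_cases hlt : a < b
  · rw [PySem.List.pyRange_one_cons hlt]
    simp only [List.foldl_cons]
    have e1 : pvStepA cs st a = (st.1, st.2 + 1) := by unfold pvStepA; rw [if_pos (h a le_rfl hlt)]
    rw [e1, pvFoldA_const cs (a + 1) b _ (by omega) (fun q h1 h2 => h q (by omega) h2)]
    have e : st.2 + 1 + (b - (a + 1)) = st.2 + (b - a) := by ring
    simp only [e]
  · have hab' : a = b := le_antisymm hab (not_lt.1 hlt)
    subst hab'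
    rw [PySem.List.pyRange_one_eq_nil le_rfl]
    simp
termination_by (b - a).toNat
decreasing_by omega

-- expansion at the first boundary stops exactly at min of the two leading runs
theorem pvExpand_first (i j : Nat) (a d : Char) (rest2 : List Char)
    (hi : 1 ≤ i) (hj : 1 ≤ j) (had : a ≠ d)
    (hh : ∀ x xs, rest2 = x :: xs → x ≠ d)
    (k : Int) (hk1 : 1 ≤ k) (hk2 : k ≤ min (i : Int) (j : Int)) :
    pvExpand (List.replicate i a ++ (List.replicate j d ++ rest2)) (i : Int) k
      = min (i : Int) (j : Int) := by
  have hlen : ((List.replicate i a ++ (List.replicate j d ++ rest2)).length : Int)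
      = (i : Int) + j + rest2.length := by simp; ring
  have eR : ∀ q : Int, 0 ≤ q → q < (j : Int) + rest2.length →
      PySem.List.pyGetD (List.replicate i a ++ (List.replicate j d ++ rest2)) ((i : Int) + q) ' '
        = PySem.List.pyGetD (List.replicate j d ++ rest2) q ' ' := by
    intro q h0 h1
    have := pvGet_app (List.replicate i a) (List.replicate j d ++ rest2) q h0 (by simp; omega)
    simpa using this
  rw [pvExpand]
  by_cases hlt : k < min (i : Int) (j : Int)
  · rw [dif_pos]
    · exact pvExpand_first i j a d rest2 hi hj had hh (k + 1) (by omega) (by omega)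
    · refine ⟨by omega, by omega, ?_, ?_⟩
      · rw [pvGet_rep i a _ ((i : Int) - k - 1) (by omega) (by omega),
            pvGet_rep i a _ ((i : Int) - 1) (by omega) (by omega)]
      · rw [eR k (by omega) (by omega)]
        have e0 : ((i : Int) + 0) = (i : Int) := by ring
        have := eR 0 le_rfl (by omega)
        rw [e0] at this
        rw [this, pvGet_rep j d rest2 k (by omega) (by omega),
            pvGet_rep j d rest2 0 (by omega) (by omega)]
  · have hk : k = min (i : Int) (j : Int) := le_antisymm hk2 (not_lt.1 hlt)
    rw [dif_neg, hk]
    intro hcond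
    obtain ⟨c1, c2, c3, c4⟩ := hcond
    by_cases hij : (i : Int) ≤ (j : Int)
    · have : k = (i : Int) := by omega
      omega
    · have hkj : k = (j : Int) := by omega
      rcases hr2 : rest2 with _ | ⟨x, xs⟩
      · have hl0 : rest2.length = 0 := by rw [hr2]; rfl
        omega
      · have hx : x ≠ d := hh x xs hr2
        rw [eR k (by omega) (by simp [hr2]; omega)] at c4
        have e0 : ((i : Int) + 0) = (i : Int) := by ring
        have h5 := eR 0 le_rfl (by omega)
        rw [e0] at h5
        rw [h5, pvGet_rep j d rest2 0 (by omega) (by omega)] at c4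
        have hxj : PySem.List.pyGetD (List.replicate j d ++ rest2) (j : Int) ' ' = x := by
          have := pvGet_app (List.replicate j d) rest2 0 le_rfl (by simp [hr2])
          simp only [List.length_replicate, add_zero] at this
          rw [this, hr2]
          rw [PySem.List.pyGetD_eq_getElem _ _ le_rfl (by simp)]
          simp
        rw [hkj, hxj] at c4
        exact hx c4
termination_by (min (i : Int) (j : Int) - k).toNat
decreasing_by omega

-- expansion at a later boundary never crosses the first run: it shifts
theorem pvExpand_shift (i : Nat) (a : Char) (rest : List Char) (hi : 1 ≤ i)
    (hh : ∀ x xs, rest = x :: xs → x ≠ a)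
    (q k : Int) (hq1 : 1 ≤ q) (hqm : q < (rest.length : Int)) (hk1 : 1 ≤ k) (hkq : k ≤ q)
    (hinv : ∀ t : Int, q - k ≤ t → t ≤ q - 1 →
      PySem.List.pyGetD rest t ' ' = PySem.List.pyGetD rest (q - 1) ' ') :
    pvExpand (List.replicate i a ++ rest) ((i : Int) + q) k = pvExpand rest q k := by
  have hlen : ((List.replicate i a ++ rest).length : Int) = (i : Int) + rest.length := by simp
  have eS : ∀ t : Int, 0 ≤ t → t < (rest.length : Int) →
      PySem.List.pyGetD (List.replicate i a ++ rest) ((i : Int) + t) ' '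
        = PySem.List.pyGetD rest t ' ' := by
    intro t h0 h1
    simpa using pvGet_app (List.replicate i a) rest t h0 h1
  conv_lhs => rw [pvExpand]
  conv_rhs => rw [pvExpand]
  by_cases hlt : k ≤ q - 1
  · have e1 : (i : Int) + q - k - 1 = (i : Int) + (q - k - 1) := by ring
    have e2 : (i : Int) + q - 1 = (i : Int) + (q - 1) := by ring
    have e3 : (i : Int) + q + k = (i : Int) + (q + k) := by ring
    by_cases hc2 : q + k ≤ (rest.length : Int) - 1
    · have hL : PySem.List.pyGetD (List.replicate i a ++ rest) ((i : Int) + q - k - 1) ' '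
          = PySem.List.pyGetD rest (q - k - 1) ' ' := by rw [e1]; exact eS _ (by omega) (by omega)
      have hL2 : PySem.List.pyGetD (List.replicate i a ++ rest) ((i : Int) + q - 1) ' '
          = PySem.List.pyGetD rest (q - 1) ' ' := by rw [e2]; exact eS _ (by omega) (by omega)
      have hR : PySem.List.pyGetD (List.replicate i a ++ rest) ((i : Int) + q + k) ' '
          = PySem.List.pyGetD rest (q + k) ' ' := by rw [e3]; exact eS _ (by omega) (by omega)
      have hR2 : PySem.List.pyGetD (List.replicate i a ++ rest) ((i : Int) + q) ' '
          = PySem.List.pyGetD rest q ' ' := eS _ (by omega) (by omega)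
      by_cases hcr : k ≤ q - 1 ∧ q + k ≤ (rest.length : Int) - 1
          ∧ PySem.List.pyGetD rest (q - k - 1) ' ' = PySem.List.pyGetD rest (q - 1) ' '
          ∧ PySem.List.pyGetD rest (q + k) ' ' = PySem.List.pyGetD rest q ' '
      · obtain ⟨d1, d2, d3, d4⟩ := hcr
        rw [dif_pos ⟨by omega, by omega, by rw [hL, hL2]; exact d3, by rw [hR, hR2]; exact d4⟩,
            dif_pos ⟨d1, d2, d3, d4⟩]
        exact pvExpand_shift i a rest hi hh q (k + 1) hq1 hqm (by omega) (by omega)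
          (by
            intro t ht1 ht2
            by_cases htk : q - k ≤ t
            · exact hinv t htk ht2
            · have : t = q - k - 1 := by omega
              rw [this]; exact d3)
      · rw [dif_neg hcr, dif_neg]
        intro hcs
        obtain ⟨c1, c2, c3, c4⟩ := hcs
        exact hcr ⟨hlt, by omega, by rw [hL, hL2] at c3; exact c3, by rw [hR, hR2] at c4; exact c4⟩
    · rw [dif_neg (by omega), dif_neg (by intro hcs; exact hc2 hcs.2.1)]
  · have hnr : ¬(k ≤ q - 1 ∧ q + k ≤ (rest.length : Int) - 1
        ∧ PySem.List.pyGetD rest (q - k - 1) ' ' = PySem.List.pyGetD rest (q - 1) ' '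
        ∧ PySem.List.pyGetD rest (q + k) ' ' = PySem.List.pyGetD rest q ' ') := by
      intro hc; exact hlt hc.1
    have hnc : ¬(k ≤ (i : Int) + q - 1 ∧ (i : Int) + q + k ≤ ((List.replicate i a ++ rest).length : Int) - 1
        ∧ PySem.List.pyGetD (List.replicate i a ++ rest) ((i : Int) + q - k - 1) ' '
            = PySem.List.pyGetD (List.replicate i a ++ rest) ((i : Int) + q - 1) ' '
        ∧ PySem.List.pyGetD (List.replicate i a ++ rest) ((i : Int) + q + k) ' '
            = PySem.List.pyGetD (List.replicate i a ++ rest) ((i : Int) + q) ' ') := by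
      intro hcs
      obtain ⟨c1, c2, c3, c4⟩ := hcs
      rcases hre : rest with _ | ⟨x, xs⟩
      · rw [hre] at hqm; simp at hqm; omega
      · have hx : x ≠ a := hh x xs hre
        have e1 : (i : Int) + q - k - 1 = (i : Int) - 1 := by omega
        have e2 : (i : Int) + q - 1 = (i : Int) + (q - 1) := by ring
        rw [e1, pvGet_rep i a rest ((i : Int) - 1) (by omega) (by omega), e2,
            eS (q - 1) (by omega) (by omega)] at c3
        have h0 : PySem.List.pyGetD rest 0 ' ' = x := by
          rw [hre, PySem.List.pyGetD_eq_getElem _ _ le_rfl (by simp)]; simp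
        have hq0 : PySem.List.pyGetD rest (q - 1) ' ' = x := by
          rw [← hinv 0 (by omega) (by omega)]; exact h0
        rw [hq0] at c3
        exact hx c3.symm
    rw [dif_neg hnc, dif_neg hnr]
termination_by (q - k).toNat
decreasing_by omega

-- A's groups list of a pure run
theorem pvAG_rep (i : Nat) (a : Char) (hi : 1 ≤ i) :
    pvAG (List.replicate i a) = [(i : Int)] := by
  have hch : ∀ q : Int, 1 ≤ q → q < (i : Int) →
      PySem.List.pyGetD (List.replicate i a) q ' '
        = PySem.List.pyGetD (List.replicate i a) (q - 1) ' ' := by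
    intro q h1 h2
    have e1 := pvGet_rep i a [] q (by omega) (by omega)
    have e2 := pvGet_rep i a [] (q - 1) (by omega) (by omega)
    rw [List.append_nil] at e1 e2
    rw [e1, e2]
  unfold pvAG
  simp only [List.length_replicate]
  rw [pvFoldA_const (List.replicate i a) 1 (i : Int) ([], 1) (by exact_mod_cast hi) hch]
  have e : (1 : Int) + ((i : Int) - 1) = (i : Int) := by ring
  simp [e]

-- A's groups list peels the leading run
theorem pvAG_deco (i : Nat) (a : Char) (rest : List Char) (hi : 1 ≤ i) (hne : rest ≠ [])
    (hh : ∀ x xs, rest = x :: xs → x ≠ a) :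
    pvAG (List.replicate i a ++ rest) = (i : Int) :: pvAG rest := by
  have hm : 0 < rest.length := List.length_pos_of_ne_nil hne
  have hlen : (((List.replicate i a ++ rest).length) : Int) = (i : Int) + rest.length := by simp
  have hch : ∀ q : Int, 1 ≤ q → q < (i : Int) →
      PySem.List.pyGetD (List.replicate i a ++ rest) q ' '
        = PySem.List.pyGetD (List.replicate i a ++ rest) (q - 1) ' ' := by
    intro q h1 h2
    rw [pvGet_rep i a rest q (by omega) (by omega),
        pvGet_rep i a rest (q - 1) (by omega) (by omega)]
  have eS : ∀ t : Int, 0 ≤ t → t < (rest.length : Int) →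
      PySem.List.pyGetD (List.replicate i a ++ rest) ((i : Int) + t) ' '
        = PySem.List.pyGetD rest t ' ' := by
    intro t h0 h1
    simpa using pvGet_app (List.replicate i a) rest t h0 h1
  have hsplit : PySem.List.pyRange 1 (((List.replicate i a ++ rest).length : Int)) 1
      = PySem.List.pyRange 1 (i : Int)
          ++ ((i : Int) :: PySem.List.pyRange ((i : Int) + 1) ((i : Int) + rest.length)) := by
    have h1 : PySem.List.pyRange (i : Int) ((i : Int) + rest.length)
        = (i : Int) :: PySem.List.pyRange ((i : Int) + 1) ((i : Int) + rest.length) :=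
      PySem.List.pyRange_one_cons (by omega)
    rw [hlen, pvRange_split 1 (i : Int) ((i : Int) + rest.length) (by exact_mod_cast hi) (by omega),
        h1]
  unfold pvAG
  rw [hsplit, List.foldl_append,
      pvFoldA_const (List.replicate i a ++ rest) 1 (i : Int) ([], 1) (by exact_mod_cast hi) hch]
  simp only [List.foldl_cons]
  have e1i : (1 : Int) + ((i : Int) - 1) = (i : Int) := by ring
  obtain ⟨x, xs, hre⟩ : ∃ x xs, rest = x :: xs := by
    cases rest with
    | nil => exact absurd rfl hne
    | cons y ys => exact ⟨y, ys, rfl⟩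
  have hstep : pvStepA (List.replicate i a ++ rest) ([], 1 + ((i : Int) - 1)) (i : Int)
      = ([(i : Int)], 1) := by
    unfold pvStepA
    rw [if_neg, e1i]
    · simp
    · have e0 : PySem.List.pyGetD (List.replicate i a ++ rest) (i : Int) ' '
          = PySem.List.pyGetD rest 0 ' ' := by
        have := eS 0 le_rfl (by omega)
        simpa using this
      have h0 : PySem.List.pyGetD rest 0 ' ' = x := by
        rw [hre, PySem.List.pyGetD_eq_getElem _ _ le_rfl (by simp)]; simp
      rw [e0, h0, pvGet_rep i a rest ((i : Int) - 1) (by omega) (by omega)]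
      exact hh x xs hre
  rw [hstep, pvFoldA_factor (List.replicate i a ++ rest) _ [(i : Int)] 1]
  have hshift : PySem.List.pyRange ((i : Int) + 1) ((i : Int) + rest.length)
      = (PySem.List.pyRange 1 (rest.length : Int)).map (· + (i : Int)) := by
    have e1 : (i : Int) + 1 = 1 + (i : Int) := by ring
    have e2 : (i : Int) + (rest.length : Int) = (rest.length : Int) + (i : Int) := by ring
    rw [e1, e2, pvRange_shift 1 (rest.length : Int) (i : Int)]
  rw [hshift, List.foldl_map]
  have hcong : (PySem.List.pyRange 1 (rest.length : Int)).foldl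
        (fun st q => pvStepA (List.replicate i a ++ rest) st (q + (i : Int))) ([], 1)
      = (PySem.List.pyRange 1 (rest.length : Int)).foldl (pvStepA rest) ([], 1) := by
    apply PySem.List.foldl_congr_mem
    intro st q hq
    have hq' := (PySem.List.mem_pyRange_one).1 hq
    unfold pvStepA
    have eA : PySem.List.pyGetD (List.replicate i a ++ rest) (q + (i : Int)) ' '
        = PySem.List.pyGetD rest q ' ' := by
      have e : q + (i : Int) = (i : Int) + q := by ring
      rw [e]; exact eS q (by omega) (by omega)
    have eB : PySem.List.pyGetD (List.replicate i a ++ rest) (q + (i : Int) - 1) ' '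
        = PySem.List.pyGetD rest (q - 1) ' ' := by
      have e : q + (i : Int) - 1 = (i : Int) + (q - 1) := by ring
      rw [e]; exact eS (q - 1) (by omega) (by omega)
    rw [eA, eB]
  rw [hcong]
  simp

-- B's total on a pure run is 0
theorem pvBval_rep (i : Nat) (a : Char) :
    pvBval (List.replicate i a) = 0 := by
  unfold pvBval
  apply List.sum_eq_zero
  intro x hx
  obtain ⟨p, hp, rfl⟩ := List.mem_map.1 hx
  have hp' := (PySem.List.mem_pyRange_one).1 hp
  simp only [List.length_replicate] at hp'
  have e1 := pvGet_rep i a [] p (by omega) (by omega)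
  have e2 := pvGet_rep i a [] (p - 1) (by omega) (by omega)
  rw [List.append_nil] at e1 e2
  unfold pvG
  rw [if_neg (not_not_intro (by rw [e1, e2]))]

-- B's total peels the leading run
theorem pvBval_deco (i j : Nat) (a d : Char) (rest2 : List Char)
    (hi : 1 ≤ i) (hj : 1 ≤ j) (had : a ≠ d)
    (hh : ∀ x xs, rest2 = x :: xs → x ≠ d) :
    pvBval (List.replicate i a ++ (List.replicate j d ++ rest2))
      = min (i : Int) (j : Int) + pvBval (List.replicate j d ++ rest2) := by
  have hm : 0 < (List.replicate j d ++ rest2).length := by simp; omega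
  have hlen : (((List.replicate i a ++ (List.replicate j d ++ rest2)).length) : Int)
      = (i : Int) + (List.replicate j d ++ rest2).length := by simp
  have eS : ∀ t : Int, 0 ≤ t → t < ((List.replicate j d ++ rest2).length : Int) →
      PySem.List.pyGetD (List.replicate i a ++ (List.replicate j d ++ rest2)) ((i : Int) + t) ' '
        = PySem.List.pyGetD (List.replicate j d ++ rest2) t ' ' := by
    intro t h0 h1
    simpa using pvGet_app (List.replicate i a) (List.replicate j d ++ rest2) t h0 h1
  have hrh : ∀ x xs, List.replicate j d ++ rest2 = x :: xs → x ≠ a := by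
    intro x xs hx
    have : x = d := by
      rcases j with _ | j'
      · omega
      · rw [List.replicate_succ, List.cons_append] at hx
        exact ((List.cons.injEq _ _ _ _ ▸ hx).1).symm
    rw [this]
    exact fun h => had h.symm
  have h0r : PySem.List.pyGetD (List.replicate j d ++ rest2) 0 ' ' = d :=
    pvGet_rep j d rest2 0 le_rfl (by omega)
  have hsplit : PySem.List.pyRange 1 (((List.replicate i a ++ (List.replicate j d ++ rest2)).length : Int)) 1
      = PySem.List.pyRange 1 (i : Int)
          ++ ((i : Int) :: PySem.List.pyRange ((i : Int) + 1)
                ((i : Int) + (List.replicate j d ++ rest2).length)) := by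
    have h1 : PySem.List.pyRange (i : Int) ((i : Int) + (List.replicate j d ++ rest2).length)
        = (i : Int) :: PySem.List.pyRange ((i : Int) + 1)
            ((i : Int) + (List.replicate j d ++ rest2).length) :=
      PySem.List.pyRange_one_cons (by omega)
    rw [hlen, pvRange_split 1 (i : Int) _ (by exact_mod_cast hi) (by omega), h1]
  unfold pvBval
  rw [hsplit, List.map_append, List.sum_append, List.map_cons, List.sum_cons]
  have hzero : ((PySem.List.pyRange 1 (i : Int)).map
      (pvG (List.replicate i a ++ (List.replicate j d ++ rest2)))).sum = 0 := by
    apply List.sum_eq_zero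
    intro x hx
    obtain ⟨p, hp, rfl⟩ := List.mem_map.1 hx
    have hp' := (PySem.List.mem_pyRange_one).1 hp
    unfold pvG
    rw [if_neg (not_not_intro (by
      rw [pvGet_rep i a _ p (by omega) (by omega),
          pvGet_rep i a _ (p - 1) (by omega) (by omega)]))]
  have hmid : pvG (List.replicate i a ++ (List.replicate j d ++ rest2)) (i : Int)
      = min (i : Int) (j : Int) := by
    unfold pvG
    have e0 : PySem.List.pyGetD (List.replicate i a ++ (List.replicate j d ++ rest2)) (i : Int) ' '
        = d := by
      have := eS 0 le_rfl (by omega)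
      simp only [add_zero] at this
      rw [this, h0r]
    rw [if_pos (by
      rw [e0, pvGet_rep i a _ ((i : Int) - 1) (by omega) (by omega)]
      exact fun h => had h.symm)]
    exact pvExpand_first i j a d rest2 hi hj had hh 1 le_rfl (by omega)
  have htail : ((PySem.List.pyRange ((i : Int) + 1)
        ((i : Int) + (List.replicate j d ++ rest2).length)).map
        (pvG (List.replicate i a ++ (List.replicate j d ++ rest2)))).sum
      = ((PySem.List.pyRange 1 ((List.replicate j d ++ rest2).length : Int)).map
          (pvG (List.replicate j d ++ rest2))).sum := by
    have hshift : PySem.List.pyRange ((i : Int) + 1)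
          ((i : Int) + (List.replicate j d ++ rest2).length)
        = (PySem.List.pyRange 1 ((List.replicate j d ++ rest2).length : Int)).map
            (· + (i : Int)) := by
      have e1 : (i : Int) + 1 = 1 + (i : Int) := by ring
      have e2 : (i : Int) + ((List.replicate j d ++ rest2).length : Int)
          = ((List.replicate j d ++ rest2).length : Int) + (i : Int) := by ring
      rw [e1, e2, pvRange_shift]
    rw [hshift, List.map_map]
    congr 1
    apply List.map_congr_left
    intro q hq
    have hq' := (PySem.List.mem_pyRange_one).1 hq
    simp only [Function.comp_apply]
    unfold pvG
    have eA : PySem.List.pyGetD (List.replicate i a ++ (List.replicate j d ++ rest2))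
        (q + (i : Int)) ' ' = PySem.List.pyGetD (List.replicate j d ++ rest2) q ' ' := by
      have e : q + (i : Int) = (i : Int) + q := by ring
      rw [e]; exact eS q (by omega) (by omega)
    have eB : PySem.List.pyGetD (List.replicate i a ++ (List.replicate j d ++ rest2))
        (q + (i : Int) - 1) ' ' = PySem.List.pyGetD (List.replicate j d ++ rest2) (q - 1) ' ' := by
      have e : q + (i : Int) - 1 = (i : Int) + (q - 1) := by ring
      rw [e]; exact eS (q - 1) (by omega) (by omega)
    rw [eA, eB]
    by_cases hb : PySem.List.pyGetD (List.replicate j d ++ rest2) q ' '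
        ≠ PySem.List.pyGetD (List.replicate j d ++ rest2) (q - 1) ' '
    · rw [if_pos hb, if_pos hb]
      have e : q + (i : Int) = (i : Int) + q := by ring
      rw [e]
      exact pvExpand_shift i a (List.replicate j d ++ rest2) hi hrh q 1 (by omega) (by omega)
        le_rfl (by omega)
        (fun t h1 h2 => by rw [show t = q - 1 by omega])
    · rw [if_neg hb, if_neg hb]
  rw [hzero, hmid, htail]
  ring

-- leading-run decomposition of a nonempty list
theorem pvRunDecomp (c : Char) (t : List Char) :
    ∃ i rest, c :: t = List.replicate i c ++ rest ∧ 1 ≤ i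
      ∧ rest.length ≤ t.length ∧ (∀ x xs, rest = x :: xs → x ≠ c) := by
  refine ⟨(t.takeWhile (· == c)).length + 1, t.dropWhile (· == c), ?_, by omega, ?_, ?_⟩
  · have hrep : t.takeWhile (· == c) = List.replicate (t.takeWhile (· == c)).length c := by
      rw [List.eq_replicate_iff]
      exact ⟨rfl, fun b hb => by simpa using List.mem_takeWhile_imp hb⟩
    rw [List.replicate_succ, List.cons_append, ← hrep, List.takeWhile_append_dropWhile]
  · exact (List.dropWhile_sublist _).length_le
  · intro x xs h
    have h2 := List.head_dropWhile_not (· == c) (l := t) (by simp [h])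
    simp [h] at h2
    simpa using h2

-- the central identity: B's total is the pair-sum of A's groups list
theorem pvMain (cs : List Char) : pvBval cs = pvPairSum (pvAG cs) := by
  induction hn : cs.length using Nat.strong_induction_on generalizing cs with
  | _ n ih =>
    cases cs with
    | nil =>
      simp [pvBval, pvAG, pvPairSum]
    | cons c t =>
      obtain ⟨i, rest, hdec, hi, hrl, hh⟩ := pvRunDecomp c t
      rcases hre : rest with _ | ⟨d, t2⟩
      · rw [hdec, hre, List.append_nil, pvBval_rep, pvAG_rep i c hi]
        simp [pvPairSum]
      · obtain ⟨j, rest2, hdec2, hj, hrl2, hh2⟩ := pvRunDecomp d t2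
        have hdc : d ≠ c := hh d t2 hre
        have hrw : rest = List.replicate j d ++ rest2 := by rw [hre, hdec2]
        have hhr : ∀ x xs, List.replicate j d ++ rest2 = x :: xs → x ≠ c := by
          intro x xs hx
          exact hh x xs (by rw [hrw, hx])
        have hlenr : (List.replicate j d ++ rest2).length = rest.length := by rw [hrw]
        have hIH : pvBval (List.replicate j d ++ rest2)
            = pvPairSum (pvAG (List.replicate j d ++ rest2)) := by
          apply ih (List.replicate j d ++ rest2).length _ _ rfl
          have h1 : (c :: t).length = n := hn
          simp only [List.length_cons] at h1
          omega
        rw [hdec, hrw, pvBval_deco i j c d rest2 hi hj (fun h => hdc h.symm) hh2,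
            pvAG_deco i c (List.replicate j d ++ rest2) hi (by simp; omega) hhr]
        have hAGr : ∃ tl, pvAG (List.replicate j d ++ rest2) = (j : Int) :: tl := by
          rcases hr2 : rest2 with _ | ⟨y, ys⟩
          · rw [List.append_nil, pvAG_rep j d hj]
            exact ⟨[], rfl⟩
          · exact ⟨_, pvAG_deco j d (y :: ys) hj (by simp) (hr2 ▸ hh2)⟩
        obtain ⟨tl, htl⟩ := hAGr
        rw [hIH, htl]
        simp [pvPairSum]

-- ===== VERDICT (by name: the statement is the Claim_ definition above) =====
theorem count_balanced_terrain_subsections_spec : Claim_equal_count_balanced_terrain_subsections := by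
  intro terrain _
  unfold Spec_count_balanced_terrain_subsections
  simp only [count_balanced_terrain_subsections, count_balanced_terrain_subsections_alt,
    PySem.Str.len_eq]
  rw [pvSecondPass_eq]
  have hB : (PySem.List.pyRange 1 ((terrain.toList.length : Int)) 1).foldl
        (pvStepB terrain.toList) 0 = pvBval terrain.toList := by
    unfold pvBval
    rw [PySem.List.foldl_congr_mem _ _ (fun acc p => acc + pvG terrain.toList p) 0 ?_]
    · rw [PySem.List.foldl_add]
      simp
    · intro acc p _
      show pvStepB terrain.toList acc p = acc + pvG terrain.toList p
      unfold pvStepB pvG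
      by_cases h : PySem.List.pyGetD terrain.toList p ' '
          ≠ PySem.List.pyGetD terrain.toList (p - 1) ' '
      · rw [if_pos h, if_pos h]
      · rw [if_neg h, if_neg h, add_zero]
  rw [hB, pvMain]
  rfl
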